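-- pv_equiv track=rewrite | github.com/WhoIsJayD/python-beginner-projects | projects/Password Projects/Password Meter/meter_pass.py | consecutiveNumbers
-- ===== SOURCE A (Python) =====
-- def consecutiveNumbers(password):
--     password = f"{password}a"
--
--     countNumbers = sum(
--         1
--         for i in range(len(password))
--         if password[i].isdigit() and password[i + 1].isdigit()
--     )
--     return (countNumbers * 2) * -1
-- ===== SOURCE B (Python) =====
-- def consecutiveNumbers(password):
--     s = f"{password}"
--     total = 0
--     run = 0
--     for c in s:
--         if c.isdigit():
--             run += 1
--         else:
--             if run > 0:
--                 total += run - 1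
--             run = 0
--     if run > 0:
--         total += run - 1
--     return -2 * total
-- ===== Notes on version B (the rewrite author's own statement) =====
-- stated objective: alternative
-- what changed: Replaces the sentinel-append plus indexed adjacent-pair scan (s[i], s[i+1] over range(len)) with a single run-length accumulation over the characters: each maximal digit run of length L contributes L-1 pairs, summed as the run closes.
import Mathlib
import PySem

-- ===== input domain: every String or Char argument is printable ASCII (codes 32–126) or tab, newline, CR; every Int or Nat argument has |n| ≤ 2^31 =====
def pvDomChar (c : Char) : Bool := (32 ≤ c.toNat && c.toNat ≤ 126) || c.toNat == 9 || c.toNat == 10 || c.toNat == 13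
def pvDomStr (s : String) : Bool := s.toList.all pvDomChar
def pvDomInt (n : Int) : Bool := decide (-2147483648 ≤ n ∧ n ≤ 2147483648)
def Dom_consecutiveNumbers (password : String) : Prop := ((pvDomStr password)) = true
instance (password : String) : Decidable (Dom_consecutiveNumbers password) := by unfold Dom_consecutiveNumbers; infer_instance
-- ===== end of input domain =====

-- B replaces A's indexed adjacent-pair scan by a run-length accumulation (each maximal
-- digit run of length L contributes L-1 pairs); alternative decomposition, same cost.

-- ===== PORT A =====
-- password[i].isdigit() on a maybe-out-of-range index; `none → false` encodes Python's
-- `and` short-circuit (the i+1 access is only out of range when the first conjunct is false).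
def pvDigitAt (cs : List Char) (i : Int) : Bool :=
  (PySem.List.pyGet? cs i).elim false PySem.Chars.isdigit

def consecutiveNumbers (password : String) : Int :=
  let s := password ++ "a"
  let cs := s.toList
  let countNumbers : Int :=
    (PySem.List.pyRange 0 (cs.length : Int) 1).foldl
      (fun acc i => if pvDigitAt cs i && pvDigitAt cs (i + 1) then acc + 1 else acc) 0
  (countNumbers * 2) * -1

-- ===== PORT B =====
def pvStepB (st : Int × Int) (c : Char) : Int × Int :=
  if PySem.Chars.isdigit c then (st.1, st.2 + 1)
  else (if st.2 > 0 then st.1 + (st.2 - 1) else st.1, 0)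

def pvFinishB (st : Int × Int) : Int :=
  if st.2 > 0 then st.1 + (st.2 - 1) else st.1

def consecutiveNumbers_alt (password : String) : Int :=
  let total := pvFinishB (password.toList.foldl pvStepB (0, 0));
  -2 * total

-- ===== PRECONDITION & SPEC =====
def Spec_consecutiveNumbers (password : String) (out : Int) : Prop := out = consecutiveNumbers_alt password
instance (password : String) (out : Int) : Decidable (Spec_consecutiveNumbers password out) := by unfold Spec_consecutiveNumbers; infer_instance

-- ===== CLAIM (what is proved, stated in full; the proofs are below) =====
def Claim_equal_consecutiveNumbers : Prop := ∀ (password : String), Dom_consecutiveNumbers password → Spec_consecutiveNumbers password (consecutiveNumbers password)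

-- ===== LEMMAS AND PROOFS =====

-- number of adjacent digit pairs
def pvPairs : List Char → Int
  | a :: b :: t => (if PySem.Chars.isdigit a && PySem.Chars.isdigit b then 1 else 0) + pvPairs (b :: t)
  | _ => 0

-- pairs with a flag 'previous char is a digit'
def pvPairsAux (prev : Bool) : List Char → Int
  | [] => 0
  | c :: t => (if prev && PySem.Chars.isdigit c then 1 else 0) + pvPairsAux (PySem.Chars.isdigit c) t

def pvDgHead : List Char → Bool
  | [] => false
  | c :: _ => PySem.Chars.isdigit c

lemma pvPairsAux_eq (l : List Char) : ∀ b : Bool,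
    pvPairsAux b l = (if b && pvDgHead l then 1 else 0) + pvPairs l := by
  induction l with
  | nil => intro b; simp [pvPairsAux, pvPairs, pvDgHead]
  | cons c t ih =>
    intro b
    simp only [pvPairsAux, pvDgHead, ih (PySem.Chars.isdigit c)]
    cases t with
    | nil => simp [pvPairs]
    | cons d t' =>
      simp only [pvPairs]
      split_ifs <;> ring

lemma pvPairsAux_append_nondigit (c : Char) (hc : PySem.Chars.isdigit c = false)
    (l : List Char) : ∀ b : Bool, pvPairsAux b (l ++ [c]) = pvPairsAux b l := by
  induction l with
  | nil => intro b; simp [pvPairsAux, hc]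
  | cons d t ih => intro b; simp [pvPairsAux, ih]

-- A-side: the indexed fold counts pvPairs
lemma pvA_fold (cs : List Char) : ∀ acc : Int,
    (List.range cs.length).foldl
      (fun a (k : Nat) => if pvDigitAt cs (k : Int) && pvDigitAt cs ((k : Int) + 1) then a + 1 else a) acc
      = acc + pvPairs cs := by
  induction cs with
  | nil => intro acc; simp [pvPairs]
  | cons c t ih =>
    intro acc
    have hshift : ∀ (k : Nat), pvDigitAt (c :: t) ((k : Int) + 1) = pvDigitAt t (k : Int) := by
      intro k; simp [pvDigitAt, PySem.List.pyGet?_cons_succ]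
    have h0 : pvDigitAt (c :: t) ((0 : Nat) : Int) = PySem.Chars.isdigit c := by
      simp [pvDigitAt]
    rw [show (c :: t).length = t.length + 1 from rfl, List.range_succ_eq_map]
    simp only [List.foldl_cons, List.foldl_map]
    have hfun : (fun (a : Int) (k : Nat) =>
          if pvDigitAt (c :: t) ((k + 1 : Nat) : Int) && pvDigitAt (c :: t) (((k + 1 : Nat) : Int) + 1) then a + 1 else a)
        = (fun (a : Int) (k : Nat) =>
          if pvDigitAt t (k : Int) && pvDigitAt t ((k : Int) + 1) then a + 1 else a) := by
      funext a k
      have hk1 : ((k + 1 : Nat) : Int) = (k : Int) + 1 := by push_cast; ring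
      rw [hk1, hshift k]
      congr 1
      rw [show ((k : Int) + 1 + 1) = ((k + 1 : Nat) : Int) + 1 from by push_cast; ring,
          hshift (k + 1), hk1]
    rw [hfun, ih]
    have h1 : pvDigitAt (c :: t) (((0 : Nat) : Int) + 1) = pvDigitAt t ((0 : Nat) : Int) := hshift 0
    rw [h0] at *
    cases t with
    | nil =>
      have : pvDigitAt ([] : List Char) ((0 : Nat) : Int) = false := by
        simp [pvDigitAt, PySem.List.pyGet?]
      rw [this] at h1
      rw [h1]
      simp [pvPairs]
    | cons d t' =>
      have hd : pvDigitAt (d :: t') ((0 : Nat) : Int) = PySem.Chars.isdigit d := by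
        simp [pvDigitAt]
      rw [hd] at h1
      rw [h1]
      simp only [pvPairs]
      split_ifs <;> ring

lemma pvA_eq (password : String) :
    consecutiveNumbers password = -2 * pvPairs (password.toList ++ ['a']) := by
  unfold consecutiveNumbers
  have hlist : (password ++ "a").toList = password.toList ++ ['a'] := by simp
  simp only [hlist]
  set cs := password.toList ++ ['a'] with hcs
  rw [PySem.List.pyRange_one]
  simp only [sub_zero, Int.toNat_natCast, List.foldl_map, zero_add]
  rw [pvA_fold cs 0]
  ring

-- B-side invariant
lemma pvB_fold (l : List Char) : ∀ (tot run : Int), 0 ≤ run →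
    pvFinishB (l.foldl pvStepB (tot, run))
      = tot + (if run > 0 then run - 1 else 0) + pvPairsAux (run > 0) l := by
  induction l with
  | nil =>
    intro tot run _
    simp only [List.foldl_nil, pvFinishB, pvPairsAux]
    split_ifs <;> ring
  | cons c t ih =>
    intro tot run hrun
    by_cases hc : PySem.Chars.isdigit c = true
    · have hstep : pvStepB (tot, run) c = (tot, run + 1) := by simp [pvStepB, hc]
      rw [List.foldl_cons, hstep, ih tot (run + 1) (by omega)]
      simp only [pvPairsAux, hc, Bool.and_true]
      by_cases h : run > 0
      · have h1 : (decide (run + 1 > 0)) = true := decide_eq_true (by omega)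
        simp only [h, decide_true, h1, if_pos (show run + 1 > 0 by omega), if_pos trivial]
        ring
      · have hr0 : run = 0 := by omega
        subst hr0
        norm_num
    · have hc' : PySem.Chars.isdigit c = false := by simpa using hc
      have hstep : pvStepB (tot, run) c
          = (if run > 0 then tot + (run - 1) else tot, 0) := by simp [pvStepB, hc']
      rw [List.foldl_cons, hstep, ih _ 0 le_rfl]
      have hd0 : (decide ((0 : Int) > 0)) = false := by decide
      simp only [pvPairsAux, hc', Bool.and_false, hd0]
      norm_num
      split_ifs <;> ring

lemma pvB_eq (password : String) :
    consecutiveNumbers_alt password = -2 * pvPairs password.toList := by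
  unfold consecutiveNumbers_alt
  rw [pvB_fold password.toList 0 0 le_rfl]
  have hd0 : (decide ((0 : Int) > 0)) = false := by decide
  rw [hd0, pvPairsAux_eq]
  norm_num

-- ===== VERDICT (by name: the statement is the Claim_ definition above) =====
theorem consecutiveNumbers_spec : Claim_equal_consecutiveNumbers := by
  intro password _
  unfold Spec_consecutiveNumbers
  rw [pvA_eq, pvB_eq]
  have ha : PySem.Chars.isdigit 'a' = false := by decide
  have := pvPairsAux_append_nondigit 'a' ha password.toList false
  have h1 := pvPairsAux_eq (password.toList ++ ['a']) false
  have h2 := pvPairsAux_eq password.toList false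
  simp only [Bool.false_and] at h1 h2
  omega
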